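-- pv_equiv track=rewrite | github.com/mantomas/ac2021 | day7.py | cost_part_two
-- ===== SOURCE A (Python) =====
-- def cost_part_two(possition, data):
--     cost = 0
--     for i in data:
--         distance = abs(i - possition)
--         single_cost = 0
--         for j in range(distance + 1):
--             single_cost += j
--         cost += single_cost
--     return cost
-- ===== SOURCE B (Python) =====
-- def cost_part_two(possition, data):
--     return sum(d * (d + 1) // 2 for d in (abs(i - possition) for i in data))
-- ===== Notes on version B (the rewrite author's own statement) =====
-- stated objective: faster
-- what changed: Replaces the inner loop summing 0..distance with the closed-form triangular number d*(d+1)//2, summed in one pass over the data.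
import Mathlib
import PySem

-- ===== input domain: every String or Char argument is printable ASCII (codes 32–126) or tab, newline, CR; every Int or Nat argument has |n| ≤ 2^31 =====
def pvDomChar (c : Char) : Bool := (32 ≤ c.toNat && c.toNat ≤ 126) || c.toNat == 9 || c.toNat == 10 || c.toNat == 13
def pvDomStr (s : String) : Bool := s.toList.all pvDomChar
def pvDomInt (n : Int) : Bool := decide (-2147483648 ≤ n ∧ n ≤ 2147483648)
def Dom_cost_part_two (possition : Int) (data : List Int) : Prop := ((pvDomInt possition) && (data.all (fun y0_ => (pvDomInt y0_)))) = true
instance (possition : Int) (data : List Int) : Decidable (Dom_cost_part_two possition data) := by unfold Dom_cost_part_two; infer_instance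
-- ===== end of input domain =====

-- B replaces A's inner loop (summing 0..distance) by the closed-form triangular number d*(d+1)//2 (objective: faster, asymptotically).

-- ===== PORT A =====
def cost_part_two (possition : Int) (data : List Int) : Int :=
  data.foldl (fun cost i =>
    let distance := |i - possition|
    let single_cost := (PySem.List.pyRange 0 (distance + 1) 1).foldl (fun s j => s + j) 0
    cost + single_cost) 0

-- ===== PORT B =====
def cost_part_two_alt (possition : Int) (data : List Int) : Int :=
  ((data.map (fun i => |i - possition|)).map (fun d => PySem.Int.floordiv (d * (d + 1)) 2)).sum

-- ===== PRECONDITION & SPEC =====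
def Spec_cost_part_two (possition : Int) (data : List Int) (out : Int) : Prop := out = cost_part_two_alt possition data
instance (possition : Int) (data : List Int) (out : Int) : Decidable (Spec_cost_part_two possition data out) := by unfold Spec_cost_part_two; infer_instance

-- ===== CLAIM (what is proved, stated in full; the proofs are below) =====
def Claim_equal_cost_part_two : Prop := ∀ (possition : Int) (data : List Int), Dom_cost_part_two possition data → Spec_cost_part_two possition data (cost_part_two possition data)

-- ===== LEMMAS AND PROOFS =====

theorem pv_sum_range_two (n : Nat) :
    2 * ((List.range n).map (fun k : Nat => (k : Int))).sum = (n : Int) * (n - 1) := by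
  induction n with
  | zero => simp
  | succ m ih =>
    rw [List.range_succ]
    simp only [List.map_append, List.sum_append, List.map_cons, List.map_nil, List.sum_cons,
      List.sum_nil, Nat.cast_succ]
    linear_combination ih

theorem pv_single (d : Int) (hd : 0 ≤ d) :
    (PySem.List.pyRange 0 (d + 1) 1).foldl (fun s j => s + j) 0 = PySem.Int.floordiv (d * (d + 1)) 2 := by
  rw [PySem.List.pyRange_one]
  have h1 : (d + 1 - 0).toNat = (d + 1).toNat := by omega
  have hfold : ∀ (l : List Int) (a : Int), l.foldl (fun s j => s + j) a = a + l.sum := by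
    intro l
    induction l with
    | nil => simp
    | cons x xs ih => intro a; simp [List.foldl_cons, ih, List.sum_cons]; ring
  rw [hfold, h1]
  simp only [zero_add]
  have h2s : 2 * ((List.range (d + 1).toNat).map (fun k : Nat => (k : Int))).sum = d * (d + 1) := by
    have h := pv_sum_range_two (d + 1).toNat
    have h3 : (((d + 1).toNat : Nat) : Int) = d + 1 := by omega
    rw [h3] at h
    linear_combination h
  rw [PySem.Int.floordiv_eq_ediv_of_pos (by norm_num), ← h2s, Int.mul_ediv_cancel_left _ (by norm_num)]

theorem pv_main (possition : Int) (data : List Int) :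
    cost_part_two possition data = cost_part_two_alt possition data := by
  unfold cost_part_two cost_part_two_alt
  induction data using List.reverseRecOn with
  | nil => simp
  | append_singleton xs x ih =>
    rw [List.foldl_append]
    simp only [List.foldl_cons, List.foldl_nil, List.map_append, List.sum_append]
    rw [ih, pv_single (|x - possition|) (abs_nonneg _)]
    simp

-- ===== VERDICT (by name: the statement is the Claim_ definition above) =====
theorem cost_part_two_spec : Claim_equal_cost_part_two := by
  intro p data _
  exact pv_main p data
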